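-- pv_equiv track=rewrite | github.com/magnmaeh/slack-stats | filter.py | filter_non_ascci
-- ===== SOURCE A (Python) =====
-- allowed_chars = [ 'a', 'b', 'c', 'd', 'e', 'f', 'g', 'h', 'i', 'j', 'k', 'l', 'm', 'n', 'o', 'p', 'q', 'r', 's', 't', 'u', 'v', 'w', 'x', 'y', 'z', 'æ', 'ø', 'å']
--
-- end_chars = [ '.', ',', '!', '?' ]
--
-- def filter_non_ascci(string):
--     strings = string.split()
--     for string, i in zip(strings, range(len(strings))):
--         for char in string:
--             if char in end_chars:
--                 strings[i] = string[:-1]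
--             if not char in allowed_chars:
--                 strings[i] = ""
--     return " ".join(strings)
-- ===== SOURCE B (Python) =====
-- ALLOWED = frozenset('abcdefghijklmnopqrstuvwxyz\u00e6\u00f8\u00e5')
--
-- def filter_non_ascci(string):
--     # A word survives iff every character is allowed; otherwise it is blanked.
--     return " ".join(w if not (set(w) - ALLOWED) else "" for w in string.split())
-- ===== Notes on version B (the rewrite author's own statement) =====
-- stated objective: simpler
-- what changed: B drops A's nested char-by-char mutation loop (with its dead end_chars/string[:-1] branch) and validates each split word at once by a set difference against a frozenset alphabet, blanking words whose character set is not contained in it.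
import Mathlib
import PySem

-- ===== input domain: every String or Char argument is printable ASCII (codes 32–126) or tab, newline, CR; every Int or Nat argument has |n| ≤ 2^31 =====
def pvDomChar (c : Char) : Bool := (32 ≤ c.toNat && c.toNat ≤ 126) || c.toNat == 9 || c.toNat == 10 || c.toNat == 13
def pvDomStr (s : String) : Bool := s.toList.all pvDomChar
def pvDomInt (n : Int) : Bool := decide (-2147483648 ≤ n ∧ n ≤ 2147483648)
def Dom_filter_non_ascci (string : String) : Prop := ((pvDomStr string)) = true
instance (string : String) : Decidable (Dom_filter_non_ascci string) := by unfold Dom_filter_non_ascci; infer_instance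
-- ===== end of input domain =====

-- B replaces A's nested char-by-char mutation loop (whose end_chars branch is dead) by a
-- per-word set-difference test against the allowed alphabet: simpler, same results.

-- ===== PORT A =====
def allowed_chars : List Char :=
  ['a','b','c','d','e','f','g','h','i','j','k','l','m','n','o','p','q','r','s','t','u','v','w','x','y','z','æ','ø','å']

def end_chars : List Char := ['.', ',', '!', '?']

-- one step of the inner 'for char in string' loop, mutating the list at index i
-- (string[:-1] is ported as PySem.List.slice … none (some (-1)) on the char list, exact)
def aCharStep (w : String) (i : Int) (acc : List String) (c : Char) : List String :=
  let acc := if c ∈ end_chars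
    then PySem.List.pySetD acc i (String.ofList (PySem.List.slice w.toList none (some (-1))))
    else acc
  if ¬ (c ∈ allowed_chars) then PySem.List.pySetD acc i "" else acc

def aInner (w : String) (i : Int) (acc : List String) : List String :=
  w.toList.foldl (aCharStep w i) acc

-- zip(strings, range(len(strings))) reads strings[i] before iteration i mutates it,
-- so zipping over the initial list is exact
def filter_non_ascci (string : String) : String :=
  let strings := PySem.Str.split₀ string
  let strings :=
    (strings.zip (PySem.List.pyRange 0 (strings.length : Int))).foldl
      (fun acc p => aInner p.1 p.2 acc) strings
  PySem.Str.join " " strings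

-- ===== PORT B =====
def pv_allowed_set : PySem.Set Char := PySem.Set.ofList "abcdefghijklmnopqrstuvwxyzæøå".toList

def filter_non_ascci_alt (string : String) : String :=
  PySem.Str.join " "
    ((PySem.Str.split₀ string).map (fun w =>
      if (PySem.Set.diff (PySem.Set.ofList w.toList) pv_allowed_set).isEmpty then w else ""))

-- ===== PRECONDITION & SPEC =====
def Spec_filter_non_ascci (string : String) (out : String) : Prop := out = filter_non_ascci_alt string
instance (string : String) (out : String) : Decidable (Spec_filter_non_ascci string out) := by unfold Spec_filter_non_ascci; infer_instance

-- ===== CLAIM (what is proved, stated in full; the proofs are below) =====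
def Claim_equal_filter_non_ascci : Prop := ∀ (string : String), Dom_filter_non_ascci string → Spec_filter_non_ascci string (filter_non_ascci string)

-- ===== LEMMAS AND PROOFS =====

-- the allowed and end character sets are disjoint
theorem pv_not_end_of_allowed {c : Char} (h : c ∈ allowed_chars) : c ∉ end_chars := by
  intro hE
  fin_cases hE <;> revert h <;> decide

theorem pv_step_allowed (w : String) (i : Int) (acc : List String) {c : Char}
    (hA : c ∈ allowed_chars) : aCharStep w i acc c = acc := by
  simp [aCharStep, hA, pv_not_end_of_allowed hA]

theorem pv_step_bad (w : String) (pre rest : List String) (x : String) {c : Char}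
    (hA : c ∉ allowed_chars) : aCharStep w (pre.length : Int) (pre ++ x :: rest) c = pre ++ "" :: rest := by
  unfold aCharStep
  split_ifs with hE <;> simp_all

-- the inner char loop only rewrites slot pre.length, ending with cur if all chars allowed, "" otherwise
theorem pv_inner_go (w : String) (cs : List Char) :
    ∀ (pre rest : List String) (cur : String),
    cs.foldl (aCharStep w (pre.length : Int)) (pre ++ cur :: rest)
    = pre ++ (if cs.all (· ∈ allowed_chars) then cur else "") :: rest := by
  induction cs with
  | nil => intro pre rest cur; simp
  | cons c cs ih =>
    intro pre rest cur
    rw [List.foldl_cons]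
    by_cases hA : c ∈ allowed_chars
    · rw [pv_step_allowed w _ _ hA, ih pre rest cur]
      simp [hA]
    · rw [pv_step_bad w pre rest cur hA, ih pre rest ""]
      simp [hA]

-- the outer word loop is a map over the words
theorem pv_outer_go (ws : List String) :
    ∀ (pre : List String),
    (ws.zip (PySem.List.pyRange (pre.length : Int) ((pre.length : Int) + (ws.length : Int)))).foldl
      (fun acc p => aInner p.1 p.2 acc) (pre ++ ws)
    = pre ++ ws.map (fun w => if w.toList.all (· ∈ allowed_chars) then w else "") := by
  induction ws with
  | nil => intro pre; simp
  | cons w ws ih =>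
    intro pre
    have hlt : (pre.length : Int) < (pre.length : Int) + ((w :: ws).length : Int) := by
      simp
    rw [PySem.List.pyRange_one_cons hlt]
    simp only [List.zip_cons_cons, List.foldl_cons]
    rw [show aInner w (pre.length : Int) (pre ++ w :: ws)
        = pre ++ (if w.toList.all (· ∈ allowed_chars) then w else "") :: ws from
      pv_inner_go w w.toList pre ws w]
    have e1 : (pre.length : Int) + 1
        = (((pre ++ [if w.toList.all (· ∈ allowed_chars) then w else ""]).length : Nat) : Int) := by
      simp
    have e2 : (pre.length : Int) + ((w :: ws).length : Int)
        = (((pre ++ [if w.toList.all (· ∈ allowed_chars) then w else ""]).length : Nat) : Int) + (ws.length : Int) := by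
      simp; ring
    rw [e1, e2,
        show pre ++ (if w.toList.all (· ∈ allowed_chars) then w else "") :: ws
          = (pre ++ [if w.toList.all (· ∈ allowed_chars) then w else ""]) ++ ws from by simp]
    rw [ih (pre ++ [if w.toList.all (· ∈ allowed_chars) then w else ""])]
    simp

theorem pv_outer_zero (ws : List String) :
    (ws.zip (PySem.List.pyRange 0 (ws.length : Int))).foldl
      (fun acc p => aInner p.1 p.2 acc) ws
    = ws.map (fun w => if w.toList.all (· ∈ allowed_chars) then w else "") := by
  have h := pv_outer_go ws []
  simpa using h

-- B's per-word set-difference test agrees with "every char allowed"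
theorem pv_word_eq (w : String) :
    (if (PySem.Set.diff (PySem.Set.ofList w.toList) pv_allowed_set).isEmpty then w else "")
    = (if w.toList.all (· ∈ allowed_chars) then w else "") := by
  have hL : "abcdefghijklmnopqrstuvwxyzæøå".toList = allowed_chars := by decide
  congr 1
  simp only [pv_allowed_set, hL, PySem.Set.diff, PySem.Set.contains_eq_listContains,
    List.contains_eq_mem, List.isEmpty_iff, List.filter_eq_nil_iff, List.all_eq_true,
    decide_eq_true_eq, Bool.not_eq_eq_eq_not, Bool.not_true,
    decide_eq_false_iff_not, Decidable.not_not, PySem.Set.mem_ofList]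

-- ===== VERDICT (by name: the statement is the Claim_ definition above) =====
theorem filter_non_ascci_spec : Claim_equal_filter_non_ascci := by
  intro s _
  show filter_non_ascci s = filter_non_ascci_alt s
  simp only [filter_non_ascci, filter_non_ascci_alt, pv_outer_zero]
  congr 1
  exact (List.map_congr_left fun w _ => (pv_word_eq w)).symm
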